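-- pv_equiv track=rewrite | github.com/henilp105/CFG-to-CNF | CFG-to-CNF.py | addAndSymbol
-- ===== SOURCE A (Python) =====
-- def addAndSymbol(input_list):
--     operators = ['|','>','-','.']
--     for rule in range(len(input_list)):
--         rules = list(input_list[rule])
--         insert_offset = 0
--         for i in range(1, len(input_list[rule])):
--             if input_list[rule][i] not in operators and input_list[rule][i-1] not in operators:
--                 a = rules[i]
--                 b = rules[i-1]
--                 rules.insert(i + insert_offset,'.')
--                 insert_offset += 1
--         input_list[rule] = ''.join(rules)
--     return input_list
-- ===== SOURCE B (Python) =====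
-- def addAndSymbol(input_list):
--     ops = set('|>-.')
--     return [''.join(a + ('.' if a not in ops and b not in ops else '')
--                     for a, b in zip(s, s[1:])) + s[-1:]
--             for s in input_list]
-- ===== Notes on version B (the rewrite author's own statement) =====
-- stated objective: simpler
-- what changed: A scans each string by index while inserting '.' into a mutable copy and maintaining an insert_offset counter; B builds each output string in one pass as a join over zip(s, s[1:]) pairs, emitting each char plus an optional '.', with no in-place inserts or offset bookkeeping (B returns a fresh list instead of mutating input_list in place; return values are identical).
import Mathlib
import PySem

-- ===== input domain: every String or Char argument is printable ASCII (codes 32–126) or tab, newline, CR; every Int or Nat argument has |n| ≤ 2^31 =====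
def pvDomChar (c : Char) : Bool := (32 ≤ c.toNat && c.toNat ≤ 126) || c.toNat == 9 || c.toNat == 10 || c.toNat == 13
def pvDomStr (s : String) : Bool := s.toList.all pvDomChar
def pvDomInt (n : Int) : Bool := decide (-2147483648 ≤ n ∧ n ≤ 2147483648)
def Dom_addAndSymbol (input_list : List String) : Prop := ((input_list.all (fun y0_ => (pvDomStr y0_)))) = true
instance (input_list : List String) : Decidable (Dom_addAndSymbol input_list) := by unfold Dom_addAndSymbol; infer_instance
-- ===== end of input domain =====

-- B replaces A's index scan with in-place inserts and an offset counter by a pairwise zip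
-- comprehension building each string once (simpler); A mutates the list in place while B
-- returns a fresh list — the equivalence proved here is about the RETURN value only.

-- ===== PORT A =====
-- literal port: outer loop over range(len(input_list)) assigning input_list[rule];
-- inner loop over range(1, len) inserting '.' with an insert_offset counter.
def addAndSymbol (input_list : List String) : List String :=
  let operators : List Char := ['|', '>', '-', '.']
  (PySem.List.pyRange 0 (input_list.length : Int) 1).foldl
    (fun acc rule =>
      let s := PySem.List.pyGetD acc rule ""   -- input_list[rule] (rule always in range)
      let cs := s.toList                        -- rules = list(input_list[rule])
      let res := (PySem.List.pyRange 1 (cs.length : Int) 1).foldl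
        (fun st i =>
          if !(operators.contains (PySem.List.pyGetD cs i ' '))
             && !(operators.contains (PySem.List.pyGetD cs (i - 1) ' '))
          then (PySem.List.insert st.1 (i + st.2) '.', st.2 + 1)
          else st)
        (cs, (0 : Int))
      PySem.List.pySetD acc rule (String.ofList res.1))  -- input_list[rule] = ''.join(rules)
    input_list

-- ===== PORT B =====
def pvOps : List Char := ['|', '>', '-', '.']

def pvNonop (c : Char) : Bool := !(pvOps.contains c)

-- ''.join(a + ('.' if … ) for a, b in zip(s, s[1:])) + s[-1:]
def pvAltOne (s : String) : String :=
  let cs := s.toList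
  String.ofList
    ((cs.zip cs.tail).flatMap
        (fun p => if pvNonop p.1 && pvNonop p.2 then [p.1, '.'] else [p.1])
      ++ cs.drop (cs.length - 1))

def addAndSymbol_alt (input_list : List String) : List String :=
  input_list.map pvAltOne

-- ===== PRECONDITION & SPEC =====
def Spec_addAndSymbol (input_list : List String) (out : List String) : Prop := out = addAndSymbol_alt input_list
instance (input_list : List String) (out : List String) : Decidable (Spec_addAndSymbol input_list out) := by unfold Spec_addAndSymbol; infer_instance

-- ===== CLAIM (what is proved, stated in full; the proofs are below) =====
def Claim_equal_addAndSymbol : Prop := ∀ (input_list : List String), Dom_addAndSymbol input_list → Spec_addAndSymbol input_list (addAndSymbol input_list)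

-- ===== LEMMAS AND PROOFS =====

-- reference form of one processed string: a '.' between each pair of adjacent non-operator chars
def dotJoin : List Char → List Char
  | [] => []
  | [c] => [c]
  | a :: b :: r =>
      if pvNonop a && pvNonop b then a :: '.' :: dotJoin (b :: r) else a :: dotJoin (b :: r)

lemma dotJoin_snoc (a b : Char) : ∀ l : List Char,
    dotJoin (l ++ [a, b])
      = dotJoin (l ++ [a]) ++ (if pvNonop a && pvNonop b then ['.', b] else [b]) := by
  intro l
  induction l with
  | nil => simp [dotJoin]; split_ifs <;> simp
  | cons x l ih =>
      cases l with
      | nil =>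
          simp only [List.nil_append, List.cons_append, dotJoin] at ih ⊢
          split_ifs <;> simp_all
      | cons y l' =>
          simp only [List.cons_append, dotJoin] at ih ⊢
          split_ifs <;> simp_all

lemma alt_core_eq_dotJoin : ∀ cs : List Char,
    (cs.zip cs.tail).flatMap
        (fun p => if pvNonop p.1 && pvNonop p.2 then [p.1, '.'] else [p.1])
      ++ cs.drop (cs.length - 1) = dotJoin cs := by
  intro cs
  induction cs using dotJoin.induct with
  | case1 => simp [dotJoin]
  | case2 c => simp [dotJoin]
  | case3 a b r h ih =>
      simp only [List.zip, List.tail_cons, List.zipWith_cons_cons, List.flatMap_cons,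
        List.length_cons, dotJoin, Nat.add_sub_cancel, List.drop_succ_cons] at ih ⊢
      simp at ih
      simp [h, ih]
  | case4 a b r h ih =>
      simp only [List.zip, List.tail_cons, List.zipWith_cons_cons, List.flatMap_cons,
        List.length_cons, dotJoin, Nat.add_sub_cancel, List.drop_succ_cons] at ih ⊢
      simp at ih
      simp [h, ih]

lemma invA (cs : List Char) : ∀ (n k : Nat), 1 ≤ k → k + n = cs.length →
    (PySem.List.pyRange (k : Int) (cs.length : Int) 1).foldl
      (fun st i =>
        if !(pvOps.contains (PySem.List.pyGetD cs i ' '))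
           && !(pvOps.contains (PySem.List.pyGetD cs (i - 1) ' '))
        then (PySem.List.insert st.1 (i + st.2) '.', st.2 + 1)
        else st)
      (dotJoin (cs.take k) ++ cs.drop k, ((dotJoin (cs.take k)).length : Int) - (k : Int))
    = (dotJoin cs, ((dotJoin cs).length : Int) - (cs.length : Int)) := by
  intro n
  induction n with
  | zero =>
      intro k hk1 hkn
      have hk : k = cs.length := by omega
      rw [PySem.List.pyRange_one_eq_nil (by exact_mod_cast Nat.le_of_eq hk.symm)]
      simp [hk]
  | succ n ih =>
      intro k hk1 hkn
      have hk : k < cs.length := by omega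
      have hk' : k - 1 < cs.length := by omega
      rw [PySem.List.pyRange_one_cons (by exact_mod_cast hk)]
      simp only [List.foldl_cons]
      have hg1 : PySem.List.pyGetD cs (k : Int) ' ' = cs[k] := by
        simp [List.getD_eq_getElem?_getD, List.getElem?_eq_getElem hk]
      have hi1 : (k : Int) - 1 = ((k - 1 : Nat) : Int) := by omega
      have hg2 : PySem.List.pyGetD cs ((k : Int) - 1) ' ' = cs[k - 1] := by
        rw [hi1]
        simp [List.getD_eq_getElem?_getD, List.getElem?_eq_getElem hk']
      have htake1 : cs.take k = cs.take (k - 1) ++ [cs[k - 1]] := by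
        conv_lhs => rw [show k = (k - 1) + 1 by omega]
        rw [List.take_succ, List.getElem?_eq_getElem hk']
        simp
      have htake2 : cs.take (k + 1) = cs.take (k - 1) ++ [cs[k - 1], cs[k]] := by
        rw [List.take_succ, List.getElem?_eq_getElem hk, htake1]
        simp only [Option.toList_some, List.append_assoc, List.cons_append, List.nil_append]
      have hsnoc : dotJoin (cs.take (k + 1))
          = dotJoin (cs.take k)
            ++ (if pvNonop cs[k - 1] && pvNonop cs[k] then ['.', cs[k]] else [cs[k]]) := by
        rw [htake2, dotJoin_snoc, ← htake1]
      have hdrop : cs.drop k = cs[k] :: cs.drop (k + 1) := List.drop_eq_getElem_cons hk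
      have hcast : ((k : Int) + 1) = ((k + 1 : Nat) : Int) := by push_cast; ring
      rw [hg1, hg2]
      cases hc1 : pvOps.contains cs[k - 1] <;> cases hc2 : pvOps.contains cs[k]
      case false.false =>
        rw [if_pos (by simp)]
        have hpos : (k : Int) + (((dotJoin (cs.take k)).length : Int) - (k : Int))
            = ((dotJoin (cs.take k)).length : Int) := by ring
        rw [hpos]
        have hins : PySem.List.insert (dotJoin (cs.take k) ++ cs.drop k)
            ((dotJoin (cs.take k)).length : Int) '.'
            = dotJoin (cs.take k) ++ '.' :: cs.drop k := by
          rw [PySem.List.insert_natCast _ _ _ (by simp)]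
          simp
        rw [hins]
        have hcond : (pvNonop cs[k - 1] && pvNonop cs[k]) = true := by
          simp only [pvNonop, hc1, hc2]; decide
        have h1 : dotJoin (cs.take k) ++ '.' :: cs.drop k
            = dotJoin (cs.take (k + 1)) ++ cs.drop (k + 1) := by
          rw [hsnoc, if_pos hcond, hdrop]; simp
        have h2 : ((dotJoin (cs.take k)).length : Int) - (k : Int) + 1
            = ((dotJoin (cs.take (k + 1))).length : Int) - ((k + 1 : Nat) : Int) := by
          rw [hsnoc, if_pos hcond]; simp; omega
        rw [h1, h2, hcast]
        exact ih (k + 1) (by omega) (by omega)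
      all_goals {
        rw [if_neg (by decide)]
        have hcond : (pvNonop cs[k - 1] && pvNonop cs[k]) = false := by
          simp only [pvNonop, hc1, hc2]; decide
        have h1 : dotJoin (cs.take k) ++ cs.drop k
            = dotJoin (cs.take (k + 1)) ++ cs.drop (k + 1) := by
          rw [hsnoc, if_neg (by simp [hcond]), hdrop]; simp
        have h2 : ((dotJoin (cs.take k)).length : Int) - (k : Int)
            = ((dotJoin (cs.take (k + 1))).length : Int) - ((k + 1 : Nat) : Int) := by
          rw [hsnoc, if_neg (by simp [hcond])]; simp
        rw [h1, h2, hcast]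
        exact ih (k + 1) (by omega) (by omega) }

lemma innerA_eq (cs : List Char) :
    ((PySem.List.pyRange 1 (cs.length : Int) 1).foldl
      (fun st i =>
        if !(pvOps.contains (PySem.List.pyGetD cs i ' '))
           && !(pvOps.contains (PySem.List.pyGetD cs (i - 1) ' '))
        then (PySem.List.insert st.1 (i + st.2) '.', st.2 + 1)
        else st)
      (cs, (0 : Int))).1 = dotJoin cs := by
  cases cs with
  | nil =>
      rw [PySem.List.pyRange_one_eq_nil (by simp)]
      simp [dotJoin]
  | cons c t =>
      have h := invA (c :: t) t.length 1 (by omega) (by simp; omega)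
      simp only [List.take_succ_cons, List.take_zero, List.drop_succ_cons, List.drop_zero,
        dotJoin, List.length_cons, Nat.cast_one] at h
      simpa using congrArg Prod.fst h

lemma foldl_set_map (F : String → String) : ∀ (suf pre : List String),
    (PySem.List.pyRange (pre.length : Int) (((pre.length + suf.length : Nat)) : Int) 1).foldl
      (fun acc rule => PySem.List.pySetD acc rule (F (PySem.List.pyGetD acc rule "")))
      (pre ++ suf)
    = pre ++ suf.map F := by
  intro suf
  induction suf with
  | nil =>
      intro pre
      rw [PySem.List.pyRange_one_eq_nil (by simp)]
      simp
  | cons c suf ih =>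
      intro pre
      rw [PySem.List.pyRange_one_cons (by push_cast [List.length_cons]; omega)]
      simp only [List.foldl_cons]
      have hget : PySem.List.pyGetD (pre ++ c :: suf) (pre.length : Int) "" = c := by
        simp [List.getD_eq_getElem?_getD]
      have hset : PySem.List.pySetD (pre ++ c :: suf) (pre.length : Int) (F c)
          = (pre ++ [F c]) ++ suf := by
        simp
      rw [hget, hset]
      have hlen1 : ((pre.length : Int) + 1) = (((pre ++ [F c]).length : Nat) : Int) := by
        simp
      have hlen2 : (((pre.length + (c :: suf).length : Nat)) : Int)
          = (((pre ++ [F c]).length + suf.length : Nat) : Int) := by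
        simp; omega
      rw [hlen1, hlen2, ih (pre ++ [F c])]
      simp

-- ===== VERDICT (by name: the statement is the Claim_ definition above) =====
theorem addAndSymbol_spec : Claim_equal_addAndSymbol := by
  intro input_list _
  show addAndSymbol input_list = addAndSymbol_alt input_list
  unfold addAndSymbol addAndSymbol_alt
  have h := foldl_set_map
      (fun s => String.ofList
        (((PySem.List.pyRange 1 (s.toList.length : Int) 1).foldl
          (fun st i =>
            if !((['|', '>', '-', '.'] : List Char).contains (PySem.List.pyGetD s.toList i ' '))
               && !((['|', '>', '-', '.'] : List Char).contains (PySem.List.pyGetD s.toList (i - 1) ' '))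
            then (PySem.List.insert st.1 (i + st.2) '.', st.2 + 1)
            else st)
          (s.toList, (0 : Int))).1))
      input_list []
  simp only [List.nil_append, List.length_nil, Nat.cast_zero, Nat.zero_add] at h
  rw [h]
  apply List.map_congr_left
  intro s _
  have hops : (['|', '>', '-', '.'] : List Char) = pvOps := rfl
  rw [hops, innerA_eq s.toList]
  unfold pvAltOne
  rw [← alt_core_eq_dotJoin s.toList]
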